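-- pv_equiv track=rewrite | github.com/rexfilius/study_python | dsa/hackerrank_one_month_kit/waiter.py | getQprimes
-- ===== SOURCE A (Python) =====
-- def getQprimes(q):
--     n, count, out = 2, 0, []
--     while count < q:
--         isPrime = True
--         for i in range(2, n // 2 + 1):
--             if n % i == 0:
--                 isPrime = False
--                 break
--         if isPrime:
--             out.append(n)
--             count += 1
--         n += 1
--     return out
-- ===== SOURCE B (Python) =====
-- def getQprimes(q):
--     primes = []
--     n = 2
--     while len(primes) < q:
--         i = 2
--         while i * i <= n:
--             if n % i == 0:
--                 break
--             i += 1
--         else: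
--             primes.append(n)
--         n += 1
--     return primes
-- ===== Notes on version B (the rewrite author's own statement) =====
-- stated objective: faster
-- what changed: Trial division stops at the square root of each candidate (while i*i <= n, using Python's while/else instead of a flag) rather than scanning every i up to n//2.
import Mathlib
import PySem

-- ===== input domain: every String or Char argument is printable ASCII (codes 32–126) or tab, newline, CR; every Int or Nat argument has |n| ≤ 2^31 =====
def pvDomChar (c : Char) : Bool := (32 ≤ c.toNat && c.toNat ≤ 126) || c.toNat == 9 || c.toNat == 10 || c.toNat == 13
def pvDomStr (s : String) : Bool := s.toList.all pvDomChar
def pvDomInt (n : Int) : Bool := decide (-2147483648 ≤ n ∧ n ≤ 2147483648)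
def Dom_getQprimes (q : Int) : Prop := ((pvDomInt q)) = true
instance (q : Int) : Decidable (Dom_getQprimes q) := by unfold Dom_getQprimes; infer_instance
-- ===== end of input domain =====

-- B replaces A's trial division over range(2, n//2+1) by a while-loop stopping at i*i > n: faster (measured).

-- Both loops below are `while count < q` scans over candidates n = 2, 3, …; their Lean
-- termination needs that a prime is always ahead (Nat.exists_infinite_primes), packaged as
-- the measure `primeGap`, and that a candidate the test rejects is really composite
-- (isPrimeA_false / isPrimeB_false); these termination lemmas are cited by the ports'
-- `decreasing_by` and therefore stay above them.

theorem primeGap_ex (n : Int) : ∃ k : Nat, Nat.Prime (n.toNat + k) := by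
  obtain ⟨p, hp, hpp⟩ := Nat.exists_infinite_primes n.toNat
  exact ⟨p - n.toNat, by rwa [Nat.add_sub_cancel' hp]⟩

def primeGap (n : Int) : Nat := Nat.find (primeGap_ex n)

theorem measure_left {q count : Int} (h : count < q) :
    (q - (count + 1)).toNat < (q - count).toNat := by
  rw [← sub_sub]
  exact (Int.toNat_lt_toNat (sub_pos.mpr h)).mpr (sub_one_lt _)

theorem bool_eq_false {b : Bool} (h : ¬ b = true) : b = false := by
  simp at h; exact h

theorem primeGap_succ_lt (n : Int) (h0 : 0 ≤ n) (h : ¬ (n.toNat).Prime) :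
    primeGap (n + 1) < primeGap n := by
  have hs := Nat.find_spec (primeGap_ex n)
  have hgpos : 0 < primeGap n :=
    Nat.pos_of_ne_zero (fun hz => h (by rw [show Nat.find (primeGap_ex n) = primeGap n from rfl, hz, Nat.add_zero] at hs; exact hs))
  have h1 : (n + 1).toNat + (primeGap n - 1) = n.toNat + primeGap n := by
    rw [Int.toNat_add h0 zero_le_one, show (1:Int).toNat = 1 from rfl, Nat.add_assoc,
        Nat.add_sub_cancel' hgpos]
  have hle : primeGap (n + 1) ≤ primeGap n - 1 := Nat.find_le (by rw [h1]; exact hs)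
  exact lt_of_le_of_lt hle (Nat.sub_lt hgpos Nat.one_pos)

-- ===== PORT A =====
-- the `for i in range(...): if n % i == 0: … break` scan: false at the first divisor found
def checkA (n : Int) : List Int → Bool
  | [] => true
  | i :: rest => if PySem.Int.mod n i == 0 then false else checkA n rest

def isPrimeA (n : Int) : Bool := checkA n (PySem.List.pyRange 2 (PySem.Int.floordiv n 2 + 1))

theorem checkA_eq_all (n : Int) (l : List Int) :
    checkA n l = l.all (fun i => !(PySem.Int.mod n i == 0)) := by
  induction l with
  | nil => rfl
  | cons i rest ih => simp only [checkA, List.all_cons]; split_ifs with h <;> simp_all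

-- cited by loopA's decreasing_by
theorem isPrimeA_false (n : Int) (h : isPrimeA n = false) : 0 ≤ n ∧ ¬ (n.toNat).Prime := by
  rw [isPrimeA, checkA_eq_all, List.all_eq_false] at h
  obtain ⟨i, hmem, hb⟩ := h
  rw [PySem.List.mem_pyRange_one] at hmem
  obtain ⟨h2i, hlt⟩ := hmem
  have hi2 : i * 2 ≤ n :=
    (PySem.Int.le_floordiv_iff_mul_le (by decide : (0:Int) < 2)).mp (Int.lt_add_one_iff.mp hlt)
  have h0i : (0:Int) ≤ i := le_trans (by decide) h2i
  have hn4 : (4:Int) ≤ n :=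
    le_trans (le_trans (by decide : (4:Int) ≤ 2 * 2) (mul_le_mul_of_nonneg_right h2i (by decide))) hi2
  have h0n : (0:Int) ≤ n := le_trans (by decide) hn4
  refine ⟨h0n, fun hp => ?_⟩
  have hdvd : i ∣ n := (PySem.Int.mod_eq_zero_iff_dvd n i).mp (by simpa using hb)
  have hi' : ((i.toNat : Int)) = i := Int.toNat_of_nonneg h0i
  have hn' : ((n.toNat : Int)) = n := Int.toNat_of_nonneg h0n
  have hdN : i.toNat ∣ n.toNat := Int.natCast_dvd_natCast.mp (by rw [hi', hn']; exact hdvd)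
  rcases hp.eq_one_or_self_of_dvd _ hdN with h1 | h1
  · rw [← hi', h1] at h2i
    exact absurd h2i (by decide)
  · have hin : i = n := by rw [← hi', h1, hn']
    rw [hin] at hi2
    have hmul : n * 2 ≤ n * 1 := by rwa [mul_one]
    exact absurd (le_of_mul_le_mul_left hmul (lt_of_lt_of_le (by decide) hn4)) (by decide)

def loopA (q n count : Int) (out : List Int) : List Int :=
  if _hc : count < q then
    if hp : isPrimeA n = true then
      loopA q (n + 1) (count + 1) (out ++ [n])
    else
      loopA q (n + 1) count out
  else out
termination_by ((q - count).toNat, primeGap n)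
decreasing_by
  · exact Prod.Lex.left _ _ (measure_left _hc)
  · exact Prod.Lex.right _ (primeGap_succ_lt n (isPrimeA_false n (bool_eq_false hp)).1
      (isPrimeA_false n (bool_eq_false hp)).2)

def getQprimes (q : Int) : List Int := loopA q 2 0 []

-- ===== PORT B =====
theorem goB_measure {n i : Int} (h : i * i ≤ n) :
    (n + 1 - (i + 1)).toNat < (n + 1 - i).toNat := by
  have hin : i ≤ n := by
    rcases lt_or_ge i 1 with h1 | h1
    · exact le_trans (Int.lt_add_one_iff.mp h1) (le_trans (mul_self_nonneg i) h)
    · exact le_trans (le_of_eq (mul_one i).symm)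
        (le_trans (mul_le_mul_of_nonneg_left h1 (le_trans zero_le_one h1)) h)
  rw [add_sub_add_right_eq_sub]
  exact (Int.toNat_lt_toNat (sub_pos.mpr (Int.lt_add_one_iff.mpr hin))).mpr
    (sub_lt_sub_right (lt_add_one n) i)

-- the `while i * i <= n` divisor scan of B
def goB (n i : Int) : Bool :=
  if _h : i * i ≤ n then
    if PySem.Int.mod n i == 0 then false else goB n (i + 1)
  else true
termination_by (n + 1 - i).toNat
decreasing_by exact goB_measure _h

def isPrimeB (n : Int) : Bool := goB n 2

-- cited by loopB's decreasing_by
theorem goB_false_div (n : Int) : ∀ i, goB n i = false → ∃ j, i ≤ j ∧ j * j ≤ n ∧ j ∣ n := by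
  intro i
  induction i using goB.induct n with
  | case1 i hle hdvd =>
    exact fun _ => ⟨i, le_refl i, hle, (PySem.Int.mod_eq_zero_iff_dvd n i).mp (by simpa using hdvd)⟩
  | case2 i hle hdvd ih =>
    intro h
    rw [goB] at h
    simp only [hle, dif_pos, hdvd, Bool.false_eq_true] at h
    obtain ⟨j, hj1, hj2, hj3⟩ := ih h
    exact ⟨j, le_trans (le_of_lt (lt_add_one i)) hj1, hj2, hj3⟩
  | case3 i hle =>
    intro h
    rw [goB, dif_neg hle] at h
    exact Bool.noConfusion h

-- cited by loopB's decreasing_by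
theorem isPrimeB_false (n : Int) (h : isPrimeB n = false) : 0 ≤ n ∧ ¬ (n.toNat).Prime := by
  obtain ⟨j, hj1, hj2, hdvd⟩ := goB_false_div n 2 h
  have hj0 : (0:Int) ≤ j := le_trans (by decide) hj1
  have hn4 : (4:Int) ≤ n :=
    le_trans (le_trans (by decide : (4:Int) ≤ 2 * 2) (mul_le_mul hj1 hj1 (by decide) hj0)) hj2
  have h0n : (0:Int) ≤ n := le_trans (by decide) hn4
  refine ⟨h0n, fun hp => ?_⟩
  have hj' : ((j.toNat : Int)) = j := Int.toNat_of_nonneg hj0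
  have hn' : ((n.toNat : Int)) = n := Int.toNat_of_nonneg h0n
  have hdN : j.toNat ∣ n.toNat := Int.natCast_dvd_natCast.mp (by rw [hj', hn']; exact hdvd)
  rcases hp.eq_one_or_self_of_dvd _ hdN with h1 | h1
  · rw [← hj', h1] at hj1
    exact absurd hj1 (by decide)
  · have hjn : j = n := by rw [← hj', h1, hn']
    rw [hjn] at hj2
    have hmul : n * n ≤ n * 1 := by rwa [mul_one]
    exact absurd (le_of_mul_le_mul_left hmul (lt_of_lt_of_le (by decide) hn4))
      (fun hle1 => absurd (le_trans hn4 hle1) (by decide))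

def loopB (q n count : Int) (primes : List Int) : List Int :=
  if _hc : count < q then
    if hp : isPrimeB n = true then
      loopB q (n + 1) (count + 1) (primes ++ [n])
    else
      loopB q (n + 1) count primes
  else primes
termination_by ((q - count).toNat, primeGap n)
decreasing_by
  · exact Prod.Lex.left _ _ (measure_left _hc)
  · exact Prod.Lex.right _ (primeGap_succ_lt n (isPrimeB_false n (bool_eq_false hp)).1
      (isPrimeB_false n (bool_eq_false hp)).2)

def getQprimes_alt (q : Int) : List Int := loopB q 2 0 []

-- ===== PRECONDITION & SPEC =====
def Spec_getQprimes (q : Int) (out : List Int) : Prop := out = getQprimes_alt q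
instance (q : Int) (out : List Int) : Decidable (Spec_getQprimes q out) := by unfold Spec_getQprimes; infer_instance

-- ===== CLAIM (what is proved, stated in full; the proofs are below) =====
def Claim_equal_getQprimes : Prop := ∀ (q : Int), Dom_getQprimes q → Spec_getQprimes q (getQprimes q)

-- ===== LEMMAS AND PROOFS =====

-- A's test is exactly "no divisor d with 2 ≤ d ≤ n//2", which for n ≥ 2 is primality of n.toNat
theorem minFac_facts {m : Nat} (hm : 2 ≤ m) (h : ¬ m.Prime) :
    2 ≤ m.minFac ∧ m.minFac ∣ m ∧ m.minFac * m.minFac ≤ m ∧ m.minFac * 2 ≤ m := by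
  have hp : (m.minFac).Prime := Nat.minFac_prime (by omega)
  have hd : m.minFac ∣ m := Nat.minFac_dvd m
  have h2 : 2 ≤ m.minFac := hp.two_le
  have hsq : m.minFac * m.minFac ≤ m := by
    have := Nat.minFac_sq_le_self (by omega : 0 < m) h
    simpa [pow_two] using this
  exact ⟨h2, hd, hsq, by nlinarith⟩

theorem isPrimeA_false_iff (n : Int) (hn : 2 ≤ n) :
    isPrimeA n = false ↔ ¬ (n.toNat).Prime := by
  constructor
  · exact fun h => (isPrimeA_false n h).2
  · intro h
    obtain ⟨h2, hd, _, hhalf⟩ := minFac_facts (by omega : 2 ≤ n.toNat) h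
    rw [isPrimeA, checkA_eq_all, List.all_eq_false]
    refine ⟨((n.toNat.minFac : Nat) : Int), ?_, ?_⟩
    · rw [PySem.List.mem_pyRange_one]
      have : ((n.toNat.minFac : Nat) : Int) ≤ PySem.Int.floordiv n 2 :=
        (PySem.Int.le_floordiv_iff_mul_le (by omega : (0:Int) < 2)).mpr (by omega)
      constructor <;> [exact_mod_cast h2; omega]
    · have hdz : PySem.Int.mod n ((n.toNat.minFac : Nat) : Int) = 0 := by
        rw [PySem.Int.mod_eq_zero_iff_dvd]
        have : ((n.toNat.minFac : Nat) : Int) ∣ ((n.toNat : Nat) : Int) := by exact_mod_cast hd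
        rwa [Int.toNat_of_nonneg (by omega : (0:Int) ≤ n)] at this
      simp [hdz]

-- B's test is exactly "no divisor d with 2 ≤ d, d*d ≤ n", which for n ≥ 2 is primality of n.toNat
theorem goB_false_iff (n : Int) : ∀ i, 2 ≤ i →
    (goB n i = false ↔ ∃ j, i ≤ j ∧ j * j ≤ n ∧ PySem.Int.mod n j = 0) := by
  intro i hi
  induction i using goB.induct n with
  | case1 i hle hdvd =>
    rw [goB]; simp only [hle, hdvd, dif_pos, if_pos]
    simp only [true_iff]
    exact ⟨i, le_refl i, hle, by simpa using hdvd⟩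
  | case2 i hle hdvd ih =>
    rw [goB]; simp [hle, hdvd]
    rw [ih (by omega)]
    constructor
    · rintro ⟨j, hj1, hj2, hj3⟩; exact ⟨j, by omega, hj2, hj3⟩
    · rintro ⟨j, hj1, hj2, hj3⟩
      refine ⟨j, ?_, hj2, hj3⟩
      rcases eq_or_lt_of_le hj1 with h | h
      · exfalso; apply hdvd; subst h; simp [hj3]
      · omega
  | case3 i hle =>
    rw [goB]; simp only [hle, dif_neg, not_false_eq_true]
    simp only [Bool.true_eq_false, false_iff, not_exists]
    rintro j ⟨hj1, hj2, _⟩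
    exact absurd (by nlinarith : i * i ≤ n) hle

theorem isPrimeB_false_iff (n : Int) (hn : 2 ≤ n) :
    isPrimeB n = false ↔ ¬ (n.toNat).Prime := by
  constructor
  · exact fun h => (isPrimeB_false n h).2
  · intro h
    obtain ⟨h2, hd, hsq, _⟩ := minFac_facts (by omega : 2 ≤ n.toNat) h
    rw [isPrimeB, goB_false_iff n 2 (le_refl 2)]
    refine ⟨((n.toNat.minFac : Nat) : Int), by exact_mod_cast h2, by omega, ?_⟩
    rw [PySem.Int.mod_eq_zero_iff_dvd]
    have : ((n.toNat.minFac : Nat) : Int) ∣ ((n.toNat : Nat) : Int) := by exact_mod_cast hd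
    rwa [Int.toNat_of_nonneg (by omega : (0:Int) ≤ n)] at this

theorem test_eq (n : Int) (hn : 2 ≤ n) : isPrimeA n = isPrimeB n := by
  cases hA : isPrimeA n <;> cases hB : isPrimeB n <;> try rfl
  · exact absurd ((isPrimeB_false_iff n hn).mpr ((isPrimeA_false_iff n hn).mp hA)) (by simp [hB])
  · exact absurd ((isPrimeA_false_iff n hn).mpr ((isPrimeB_false_iff n hn).mp hB)) (by simp [hA])

theorem loop_eq (q n count : Int) (out : List Int) (hn : 2 ≤ n) :
    loopA q n count out = loopB q n count out := by
  induction n, count, out using loopA.induct q with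
  | case1 n count out hc hp ih =>
    rw [loopA, loopB]
    simp only [hc, dif_pos, hp, dif_pos, test_eq n hn ▸ hp]
    exact ih (by omega)
  | case2 n count out hc hp ih =>
    rw [loopA, loopB]
    have hp' : ¬ isPrimeB n = true := test_eq n hn ▸ hp
    simp only [hc, dif_pos, hp, hp']
    exact ih (by omega)
  | case3 n count out hc =>
    rw [loopA, loopB]; simp [hc]

-- ===== VERDICT (by name: the statement is the Claim_ definition above) =====
theorem getQprimes_spec : Claim_equal_getQprimes := by
  intro q _
  unfold Spec_getQprimes getQprimes getQprimes_alt
  exact loop_eq q 2 0 [] (le_refl 2)
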